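-- pv_equiv track=rewrite | github.com/NewNLPer/nlp_Learnning | daily learn/7.6.py | function11
-- ===== SOURCE A (Python) =====
-- def function11(nums):
--     dp=[1]*len(nums)
--     res=0
--     for i in range(1,len(nums)):
--         for j in range(i):
--             if nums[i]>nums[j]:
--                 dp[i]=max(dp[j]+1,dp[i])
--         if dp[i]>=3:
--             res+=(dp[i]-3+1)
--     return res
-- ===== SOURCE B (Python) =====
-- def function11(nums):
--     # Patience-style: 'tails' keeps the smallest possible tail of an increasing
--     # subsequence of each length; the insertion position gives the LIS length
--     # ending at the current element, replacing the inner scan over all previous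
--     # indices by a scan over the sorted tails list (short on typical inputs,
--     # but still the whole list when the input is sorted).
--     tails = []
--     res = 0
--     for x in nums:
--         pos = 0
--         while pos < len(tails) and tails[pos] < x:
--             pos += 1
--         if pos == len(tails):
--             tails.append(x)
--         else:
--             tails[pos] = x
--         if pos >= 2:
--             res += pos - 1
--     return res
-- ===== Notes on version B (the rewrite author's own statement) =====
-- stated objective: alternative
-- what changed: Replaces the quadratic dp over all previous indices by a patience-sorting tails list: each element's LIS-ending length is its insertion position in the sorted tails list, found by a scan over tails (whose length is the current LIS length) instead of over all previous elements.
import Mathlib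
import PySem

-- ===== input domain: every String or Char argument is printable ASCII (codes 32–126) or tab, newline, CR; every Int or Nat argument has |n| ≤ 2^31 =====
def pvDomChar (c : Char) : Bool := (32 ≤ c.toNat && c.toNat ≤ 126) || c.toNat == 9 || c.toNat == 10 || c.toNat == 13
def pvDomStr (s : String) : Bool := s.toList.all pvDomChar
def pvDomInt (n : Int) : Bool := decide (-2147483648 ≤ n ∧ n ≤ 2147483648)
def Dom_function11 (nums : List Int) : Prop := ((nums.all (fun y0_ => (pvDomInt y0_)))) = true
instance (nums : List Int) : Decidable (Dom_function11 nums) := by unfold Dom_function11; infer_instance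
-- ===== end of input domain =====

-- B replaces A's dp scan over all previous indices by a patience-sorting tails
-- list: the insertion position of each element in the sorted tails list is its
-- LIS-ending length minus one (objective: alternative; the tails scan is short
-- on typical inputs but both are O(n^2) on sorted input).

-- ===== PORT A =====
def function11 (nums : List Int) : Int :=
  let st := (PySem.List.pyRange 1 (nums.length : Int) 1).foldl
    (fun (st : List Int × Int) i =>
      let dp := (PySem.List.pyRange 0 i 1).foldl
        (fun dp j =>
          if PySem.List.pyGetD nums i 0 > PySem.List.pyGetD nums j 0 then
            PySem.List.pySetD dp i (max (PySem.List.pyGetD dp j 0 + 1) (PySem.List.pyGetD dp i 0))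
          else dp) st.1
      let res := if PySem.List.pyGetD dp i 0 ≥ 3
                 then st.2 + (PySem.List.pyGetD dp i 0 - 3 + 1) else st.2
      (dp, res))
    (List.replicate nums.length (1 : Int), (0 : Int))
  st.2

-- ===== PORT B =====
-- the 'while pos < len(tails) and tails[pos] < x: pos += 1' scan of Source B
def insertPos (tails : List Int) (x : Int) : Nat :=
  match tails with
  | [] => 0
  | t :: ts => if t < x then insertPos ts x + 1 else 0

def function11_alt (nums : List Int) : Int :=
  (nums.foldl
    (fun (st : List Int × Int) x =>
      let tails := st.1
      let pos := insertPos tails x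
      let tails' := if pos = tails.length then tails ++ [x] else tails.set pos x
      let res := if pos ≥ 2 then st.2 + ((pos : Int) - 1) else st.2
      (tails', res))
    ([], 0)).2

-- ===== PRECONDITION & SPEC =====
def Spec_function11 (nums : List Int) (out : Int) : Prop := out = function11_alt nums
instance (nums : List Int) (out : Int) : Decidable (Spec_function11 nums out) := by unfold Spec_function11; infer_instance

-- ===== CLAIM (what is proved, stated in full; the proofs are below) =====
def Claim_equal_function11 : Prop := ∀ (nums : List Int), Dom_function11 nums → Spec_function11 nums (function11 nums)

-- ===== LEMMAS AND PROOFS =====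

-- Functional model of A's dp: dpOf pre x is the final dp value of an element x
-- whose predecessors (value, dp) are listed in pre.
def dpOf (pre : List (Int × Int)) (x : Int) : Int :=
  pre.foldl (fun d p => if x > p.1 then max (p.2 + 1) d else d) 1

def dpsFrom (pre : List (Int × Int)) (xs : List Int) : List (Int × Int) :=
  xs.foldl (fun p x => p ++ [(x, dpOf p x)]) pre

def contrib (d : Int) : Int := if d ≥ 3 then d - 2 else 0

def sumContrib (l : List (Int × Int)) : Int := (l.map (fun p => contrib p.2)).sum

-- running total in B's traversal order
def csum : List (Int × Int) → List Int → Int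
  | _, [] => 0
  | pre, x :: xs => contrib (dpOf pre x) + csum (pre ++ [(x, dpOf pre x)]) xs

def countLt (l : List Int) (y : Int) : Nat := l.countP (fun t => decide (t < y))

def maxDp (pre : List (Int × Int)) (y : Int) : Int :=
  pre.foldl (fun m p => if p.1 < y then max m p.2 else m) 0

-- invariant tying B's tails list to A's dp values of the processed prefix
def BInv (pre : List (Int × Int)) (tails : List Int) : Prop :=
  tails.Pairwise (· < ·) ∧ ∀ y : Int, (countLt tails y : Int) = maxDp pre y

theorem dpOf_aux (pre : List (Int × Int)) (x : Int) (a : Int) :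
    pre.foldl (fun d p => if x > p.1 then max (p.2 + 1) d else d) (a + 1)
      = 1 + pre.foldl (fun m p => if p.1 < x then max m p.2 else m) a := by
  induction pre generalizing a with
  | nil => simp [Int.add_comm]
  | cons p ps ih =>
    simp only [List.foldl_cons]
    by_cases h : p.1 < x
    · have hx : x > p.1 := h
      rw [if_pos hx, if_pos h]
      have : max (p.2 + 1) (a + 1) = max a p.2 + 1 := by omega
      rw [this, ih]
    · have hx : ¬ x > p.1 := h
      rw [if_neg hx, if_neg h, ih]

theorem dpOf_eq_maxDp (pre : List (Int × Int)) (x : Int) :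
    dpOf pre x = 1 + maxDp pre x := by
  have := dpOf_aux pre x 0
  simpa [dpOf, maxDp] using this

theorem insertPos_eq_countLt (tails : List Int) (x : Int)
    (h : tails.Pairwise (· < ·)) : insertPos tails x = countLt tails x := by
  induction tails with
  | nil => simp [insertPos, countLt]
  | cons t ts ih =>
    rcases List.pairwise_cons.mp h with ⟨h1, h2⟩
    by_cases hlt : t < x
    · simp [insertPos, countLt, hlt, ih h2]
    · have hz : ts.countP (fun u => decide (u < x)) = 0 := by
        apply List.countP_eq_zero.mpr
        intro u hu
        have : t < u := h1 u hu
        simp only [decide_eq_true_eq]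
        omega
      simp [insertPos, countLt, hlt, hz]

theorem mem_step_tails (tails : List Int) (x u : Int)
    (hu : u ∈ (if insertPos tails x = tails.length then tails ++ [x]
                else tails.set (insertPos tails x) x)) : u ∈ tails ∨ u = x := by
  split at hu
  · rcases List.mem_append.mp hu with h | h
    · exact Or.inl h
    · exact Or.inr (List.mem_singleton.mp h)
  · exact List.mem_or_eq_of_mem_set hu

theorem step_tails (tails : List Int) (x : Int) (h : tails.Pairwise (· < ·)) :
    (if insertPos tails x = tails.length then tails ++ [x]
     else tails.set (insertPos tails x) x).Pairwise (· < ·) ∧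
      ∀ y : Int,
        countLt (if insertPos tails x = tails.length then tails ++ [x]
                 else tails.set (insertPos tails x) x) y
          = max (countLt tails y) (if x < y then insertPos tails x + 1 else 0) := by
  induction tails with
  | nil =>
    constructor
    · simp [insertPos]
    · intro y
      simp [insertPos, countLt, List.countP_cons]
  | cons t ts ih =>
    rcases List.pairwise_cons.mp h with ⟨h1, h2⟩
    rcases ih h2 with ⟨ihP, ihC⟩
    by_cases hlt : t < x
    · -- pos = insertPos ts x + 1; the head t stays in place
      have hpos : insertPos (t :: ts) x = insertPos ts x + 1 := by
        simp [insertPos, hlt]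
      have hsplit :
          (if insertPos (t :: ts) x = (t :: ts).length then (t :: ts) ++ [x]
           else (t :: ts).set (insertPos (t :: ts) x) x)
          = t :: (if insertPos ts x = ts.length then ts ++ [x]
                  else ts.set (insertPos ts x) x) := by
        rw [hpos]
        by_cases he : insertPos ts x = ts.length
        · simp [he]
        · have hne : ¬ insertPos ts x + 1 = (t :: ts).length := by
            simp [List.length_cons]; omega
          rw [if_neg hne, if_neg he]
          rfl
      rw [hsplit]
      constructor
      · apply List.pairwise_cons.mpr
        refine ⟨?_, ihP⟩
        intro u hu
        rcases mem_step_tails ts x u hu with h | h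
        · exact h1 u h
        · omega
      · intro y
        have hc := ihC y
        simp only [countLt, List.countP_cons] at *
        by_cases hxy : x < y
        · have hty : t < y := by omega
          simp only [hxy, if_pos] at hc ⊢
          simp [hty, hc]
          omega
        · rw [if_neg hxy] at hc ⊢
          by_cases hty : t < y <;> simp [hty, hc]
    · -- pos = 0: replace the head
      have hpos : insertPos (t :: ts) x = 0 := by simp [insertPos, hlt]
      have hne : ¬ insertPos (t :: ts) x = (t :: ts).length := by
        simp [hpos, List.length_cons]
      rw [if_neg hne, hpos]
      have hset : (t :: ts).set 0 x = x :: ts := by simp [List.set]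
      rw [hset]
      constructor
      · apply List.pairwise_cons.mpr
        refine ⟨?_, h2⟩
        intro u hu
        have := h1 u hu
        omega
      · intro y
        simp only [countLt, List.countP_cons]
        by_cases hxy : x < y
        · by_cases hty : t < y
          · simp [hxy, hty]
          · have hz : ts.countP (fun u => decide (u < y)) = 0 := by
              apply List.countP_eq_zero.mpr
              intro u hu
              have := h1 u hu
              simp only [decide_eq_true_eq]
              omega
            simp [hxy, hty, hz]
        · have hty : ¬ t < y := by omega
          simp [hxy, hty]

theorem maxDp_append (pre : List (Int × Int)) (x d y : Int) :
    maxDp (pre ++ [(x, d)]) y = if x < y then max (maxDp pre y) d else maxDp pre y := by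
  simp [maxDp, List.foldl_append]

theorem inv_step (pre : List (Int × Int)) (tails : List Int) (x : Int) (h : BInv pre tails) :
    (insertPos tails x : Int) = maxDp pre x ∧
    BInv (pre ++ [(x, dpOf pre x)])
      (if insertPos tails x = tails.length then tails ++ [x]
       else tails.set (insertPos tails x) x) := by
  rcases h with ⟨hP, hC⟩
  have h1 : (insertPos tails x : Int) = maxDp pre x := by
    rw [insertPos_eq_countLt tails x hP]; exact hC x
  refine ⟨h1, (step_tails tails x hP).1, ?_⟩
  intro y
  have h2 := (step_tails tails x hP).2 y
  rw [maxDp_append, dpOf_eq_maxDp, h2]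
  have hcy := hC y
  by_cases hxy : x < y
  · rw [if_pos hxy] at *
    push_cast
    omega
  · rw [if_neg hxy] at *
    push_cast
    omega

def stepB (st : List Int × Int) (x : Int) : List Int × Int :=
  (if insertPos st.1 x = st.1.length then st.1 ++ [x] else st.1.set (insertPos st.1 x) x,
   if insertPos st.1 x ≥ 2 then st.2 + ((insertPos st.1 x : Int) - 1) else st.2)

theorem alt_eq_fold (nums : List Int) :
    function11_alt nums = (nums.foldl stepB ([], 0)).2 := rfl

theorem b_loop (xs : List Int) (pre : List (Int × Int)) (tails : List Int) (r : Int)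
    (h : BInv pre tails) :
    (xs.foldl stepB (tails, r)).2 = r + csum pre xs := by
  induction xs generalizing pre tails r with
  | nil => simp [csum]
  | cons x xs ih =>
    obtain ⟨hpos, hinv⟩ := inv_step pre tails x h
    have hres : (if insertPos tails x ≥ 2 then r + ((insertPos tails x : Int) - 1) else r)
        = r + contrib (dpOf pre x) := by
      rw [dpOf_eq_maxDp, ← hpos]
      unfold contrib
      split_ifs <;> omega
    rw [List.foldl_cons]
    show (xs.foldl stepB
      (if insertPos tails x = tails.length then tails ++ [x]
       else tails.set (insertPos tails x) x,
       if insertPos tails x ≥ 2 then r + ((insertPos tails x : Int) - 1) else r)).2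
      = r + csum pre (x :: xs)
    rw [ih _ _ _ hinv, hres, csum, add_assoc]

theorem sumContrib_append (pre : List (Int × Int)) (e : Int × Int) :
    sumContrib (pre ++ [e]) = sumContrib pre + contrib e.2 := by
  simp [sumContrib]

theorem sumContrib_dpsFrom (xs : List Int) (pre : List (Int × Int)) :
    sumContrib (dpsFrom pre xs) = sumContrib pre + csum pre xs := by
  induction xs generalizing pre with
  | nil => simp [dpsFrom, csum]
  | cons x xs ih =>
    have hstep : dpsFrom pre (x :: xs) = dpsFrom (pre ++ [(x, dpOf pre x)]) xs := rfl
    rw [hstep, ih, sumContrib_append, csum]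
    show sumContrib pre + contrib (dpOf pre x) + _ = sumContrib pre + (contrib (dpOf pre x) + _)
    omega

theorem alt_eq (nums : List Int) : function11_alt nums = sumContrib (dpsFrom [] nums) := by
  have hinv : BInv [] [] := by
    constructor
    · exact List.Pairwise.nil
    · intro y; simp [countLt, maxDp]
  rw [alt_eq_fold, b_loop nums [] [] 0 hinv, sumContrib_dpsFrom]
  simp [sumContrib]

-- ---------- A side ----------
def dps0 (xs : List Int) : List (Int × Int) := dpsFrom [] xs

def stepA (nums : List Int) (st : List Int × Int) (i : Int) : List Int × Int :=
  let dp := (PySem.List.pyRange 0 i 1).foldl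
    (fun dp j =>
      if PySem.List.pyGetD nums i 0 > PySem.List.pyGetD nums j 0 then
        PySem.List.pySetD dp i (max (PySem.List.pyGetD dp j 0 + 1) (PySem.List.pyGetD dp i 0))
      else dp) st.1
  let res := if PySem.List.pyGetD dp i 0 ≥ 3
             then st.2 + (PySem.List.pyGetD dp i 0 - 3 + 1) else st.2
  (dp, res)

theorem a_eq_fold (nums : List Int) :
    function11 nums
      = ((PySem.List.pyRange 1 (nums.length : Int) 1).foldl (stepA nums)
          (List.replicate nums.length (1 : Int), (0 : Int))).2 := rfl

def dpMap (nums : List Int) (i : Nat) : List Int :=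
  (dps0 (nums.take i)).map (·.2) ++ List.replicate (nums.length - i) 1

theorem dpsFrom_length (xs : List Int) (pre : List (Int × Int)) :
    (dpsFrom pre xs).length = pre.length + xs.length := by
  induction xs generalizing pre with
  | nil => simp [dpsFrom]
  | cons x xs ih =>
    have hstep : dpsFrom pre (x :: xs) = dpsFrom (pre ++ [(x, dpOf pre x)]) xs := rfl
    rw [hstep, ih]
    simp
    omega

theorem dpsFrom_fst (xs : List Int) (pre : List (Int × Int)) :
    (dpsFrom pre xs).map (·.1) = pre.map (·.1) ++ xs := by
  induction xs generalizing pre with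
  | nil => simp [dpsFrom]
  | cons x xs ih =>
    have hstep : dpsFrom pre (x :: xs) = dpsFrom (pre ++ [(x, dpOf pre x)]) xs := rfl
    rw [hstep, ih]
    simp

theorem dpsFrom_append (pre : List (Int × Int)) (xs ys : List Int) :
    dpsFrom pre (xs ++ ys) = dpsFrom (dpsFrom pre xs) ys := by
  simp [dpsFrom, List.foldl_append]

theorem dps0_take_succ (nums : List Int) (i : Nat) (hi : i < nums.length) :
    dps0 (nums.take (i + 1))
      = dps0 (nums.take i)
        ++ [(nums.getD i 0, dpOf (dps0 (nums.take i)) (nums.getD i 0))] := by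
  have htake : nums.take (i + 1) = nums.take i ++ [nums.getD i 0] := by
    rw [List.take_add_one]
    congr 1
    rw [List.getElem?_eq_getElem hi]
    simp [List.getD, List.getElem?_eq_getElem hi]
  rw [dps0, htake, dpsFrom_append]
  rfl

theorem getD_append_of_len (A B : List Int) (n : Nat) (h : A.length = n) (d : Int) :
    (A ++ B).getD n d = B.getD 0 d := by
  subst h
  simp [List.getD, List.getElem?_append_right (Nat.le_refl _)]

theorem getD_set_self (l : List Int) (k : Nat) (v d : Int) (h : k < l.length) :
    (l.set k v).getD k d = v := by simp [h]

theorem getD_set_ne (l : List Int) (k j : Nat) (v d : Int) (h : k ≠ j) :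
    (l.set k v).getD j d = l.getD j d := by
  simp [List.getD, List.getElem?_set_ne h]

theorem inner_set (nums dp : List Int) (k : Nat) (hk : k < dp.length) (m : Nat) (hm : m ≤ k) :
    (List.range m).foldl
      (fun d j => if nums.getD k 0 > nums.getD j 0
                  then d.set k (max (d.getD j 0 + 1) (d.getD k 0)) else d) dp
      = dp.set k ((List.range m).foldl
          (fun c j => if nums.getD k 0 > nums.getD j 0
                      then max (dp.getD j 0 + 1) c else c) (dp.getD k 0)) := by
  induction m with
  | zero =>
    simp only [List.range_zero, List.foldl_nil]
    rw [List.getD_eq_getElem _ _ hk, List.set_getElem_self hk]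
  | succ m ih =>
    have hm' : m ≤ k := by omega
    have hne : k ≠ m := by omega
    rw [List.range_succ, List.foldl_append, List.foldl_append, ih hm',
        List.foldl_cons, List.foldl_nil, List.foldl_cons, List.foldl_nil]
    by_cases hc : nums.getD k 0 > nums.getD m 0
    · rw [if_pos hc, if_pos hc, getD_set_ne dp k m _ 0 hne,
          getD_set_self dp k _ 0 hk, List.set_set]
    · rw [if_neg hc, if_neg hc]

theorem foldl_range_getD {α β : Type} (l : List α) (d : α) (f : β → α → β) (b : β) :
    (List.range l.length).foldl (fun c j => f c (l.getD j d)) b = l.foldl f b := by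
  induction l using List.reverseRecOn with
  | nil => simp
  | append_singleton l a ih =>
    rw [List.length_append, List.length_singleton, List.range_succ,
        List.foldl_append, List.foldl_append]
    have hcongr : (List.range l.length).foldl (fun c j => f c ((l ++ [a]).getD j d)) b
        = (List.range l.length).foldl (fun c j => f c (l.getD j d)) b := by
      apply PySem.List.foldl_congr_mem
      intro acc j hj
      rw [List.getD_append _ _ _ _ (List.mem_range.mp hj)]
    rw [hcongr, ih]
    simp [List.getD]

theorem stepA_eq (nums : List Int) (i : Nat) (hi : i < nums.length) :
    stepA nums (dpMap nums i, sumContrib (dps0 (nums.take i))) (i : Int)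
      = (dpMap nums (i + 1), sumContrib (dps0 (nums.take (i + 1)))) := by
  have hP : (dps0 (nums.take i)).length = i := by
    rw [dps0, dpsFrom_length]
    simp
    omega
  have hlm : ((dps0 (nums.take i)).map (fun p => p.2)).length = i := by simp [hP]
  have hdpl : (dpMap nums i).length = nums.length := by
    simp [dpMap, hP]
    omega
  have hrep : nums.length - i = (nums.length - (i + 1)) + 1 := by omega
  have hgetI : (dpMap nums i).getD i 0 = 1 := by
    rw [dpMap, getD_append_of_len _ _ _ hlm, hrep, List.replicate_succ]
    simp [List.getD]
  have hgetJ2 : ∀ j, j < i → (dpMap nums i).getD j 0 = ((dps0 (nums.take i)).getD j (0, 0)).2 := by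
    intro j hj
    rw [dpMap, List.getD_append _ _ _ _ (by rw [hlm]; exact hj)]
    exact List.getD_map _ (0, 0) (fun p => p.2)
  have hgetJ1 : ∀ j, j < i → nums.getD j 0 = ((dps0 (nums.take i)).getD j (0, 0)).1 := by
    intro j hj
    have hfst : (dps0 (nums.take i)).map (fun p => p.1) = nums.take i := by
      rw [dps0, dpsFrom_fst]
      simp
    have h1 : ((dps0 (nums.take i)).getD j (0, 0)).1
        = ((dps0 (nums.take i)).map (fun p => p.1)).getD j 0 :=
      (List.getD_map _ (0, 0) (fun p => p.1)).symm
    rw [h1, hfst]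
    simp [List.getD, hj]
  have hc : (List.range i).foldl
      (fun c j => if nums.getD i 0 > nums.getD j 0
                  then max ((dpMap nums i).getD j 0 + 1) c else c) 1
      = dpOf (dps0 (nums.take i)) (nums.getD i 0) := by
    rw [dpOf, ← foldl_range_getD (dps0 (nums.take i)) (0, 0)
          (fun d p => if nums.getD i 0 > p.1 then max (p.2 + 1) d else d) 1, hP]
    apply PySem.List.foldl_congr_mem
    intro acc j hj
    have hji : j < i := List.mem_range.mp hj
    rw [hgetJ1 j hji, hgetJ2 j hji]
  have hset : (dpMap nums i).set i (dpOf (dps0 (nums.take i)) (nums.getD i 0))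
      = dpMap nums (i + 1) := by
    rw [dpMap, dpMap, List.set_append_right _ _ (by rw [hlm]), hlm]
    rw [dps0_take_succ nums i hi]
    simp only [Nat.sub_self, hrep, List.replicate_succ, List.map_append, List.map_cons,
      List.map_nil, List.set]
    simp
  have hgv : (dpMap nums (i + 1)).getD i 0 = dpOf (dps0 (nums.take i)) (nums.getD i 0) := by
    rw [← hset]
    exact getD_set_self _ _ _ _ (by rw [hdpl]; exact hi)
  have hsum : sumContrib (dps0 (nums.take (i + 1)))
      = sumContrib (dps0 (nums.take i)) + contrib (dpOf (dps0 (nums.take i)) (nums.getD i 0)) := by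
    rw [dps0_take_succ nums i hi, sumContrib_append]
  unfold stepA
  simp only [PySem.List.pyRange_zero_natCast, List.foldl_map,
    PySem.List.pyGetD_natCast, PySem.List.pySetD_natCast]
  rw [inner_set nums (dpMap nums i) i (by rw [hdpl]; exact hi) i (Nat.le_refl i)]
  rw [hgetI, hc, hset, hgv, hsum]
  unfold contrib
  split_ifs
  · simp
    omega
  · simp

theorem outer (nums : List Int) (k : Nat) (hk : k ≤ nums.length) :
    (PySem.List.pyRange 1 (k : Int) 1).foldl (stepA nums)
        (List.replicate nums.length (1 : Int), (0 : Int))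
      = (dpMap nums k, sumContrib (dps0 (nums.take k))) := by
  induction k with
  | zero =>
    rw [PySem.List.pyRange_one_eq_nil (by norm_num)]
    simp [dpMap, dps0, dpsFrom, sumContrib]
  | succ k ih =>
    by_cases hk0 : k = 0
    · subst hk0
      rw [show ((1 : Nat) : Int) = 1 by norm_num,
          PySem.List.pyRange_one_eq_nil (le_refl 1), List.foldl_nil]
      rcases nums with _ | ⟨a, t⟩
      · simp at hk
      · have hdp1 : dpOf [] a = 1 := rfl
        simp [dpMap, dps0, dpsFrom, sumContrib, hdp1, contrib,
          List.replicate_succ]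
    · have hk1 : (1 : Int) ≤ (k : Int) := by exact_mod_cast Nat.one_le_iff_ne_zero.mpr hk0
      have hcast : ((k + 1 : Nat) : Int) = (k : Int) + 1 := by push_cast; ring
      rw [hcast, PySem.List.pyRange_one_succ_right (le_trans hk1 (by omega)),
          List.foldl_append, ih (by omega), List.foldl_cons, List.foldl_nil]
      exact stepA_eq nums k (by omega)

theorem a_eq (nums : List Int) : function11 nums = sumContrib (dpsFrom [] nums) := by
  have h := outer nums nums.length le_rfl
  rw [a_eq_fold, h]
  simp [dps0, List.take_length]

-- ===== VERDICT (by name: the statement is the Claim_ definition above) =====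
theorem function11_spec : Claim_equal_function11 := by
  intro nums _
  unfold Spec_function11
  rw [a_eq, alt_eq]
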